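-- pv_equiv track=rewrite | github.com/SingSongZepe/leetletcodcode | lc819_py/main.py | mostCommonWord
-- ===== SOURCE A (Python) =====
-- from typing import List
-- from collections import defaultdict
--
-- def mostCommonWord(paragraph: str, banned: List[str]) -> str:
--     word = ''
--     counts = defaultdict(int)
--     for c in paragraph + ' ':
--         if c in " !?',;.":
--             if word:
--                 counts[word] += 1
--                 word = ''
--         else:
--             word += c.lower()
--
--     banned = set(banned)
--     most_common = ''
--     most_count = 0
--     for w, c in counts.items():
--         if w not in banned and c > most_count:
--             most_common = w
--             most_count = c
--
--     return most_common
-- ===== SOURCE B (Python) =====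
-- from collections import Counter
--
--
-- def mostCommonWord(paragraph, banned):
--     table = str.maketrans("!?',;.", "      ")
--     words = [w for w in paragraph.lower().translate(table).split(' ') if w]
--     counts = Counter(words)
--     banned_set = set(banned)
--     return max((w for w in counts if w not in banned_set),
--                key=lambda w: counts[w], default='')
-- ===== Notes on version B (the rewrite author's own statement) =====
-- stated objective: idiomatic
-- what changed: Replaces the manual char-accumulate-and-flush loop and hand-rolled dict/arg-max scan with translate-delimiters-to-space + split(' ') tokenization, a collections.Counter, and a single max(..., key=..., default='') over the non-banned words (first-wins, matching A's strict-> scan).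
import Mathlib
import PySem

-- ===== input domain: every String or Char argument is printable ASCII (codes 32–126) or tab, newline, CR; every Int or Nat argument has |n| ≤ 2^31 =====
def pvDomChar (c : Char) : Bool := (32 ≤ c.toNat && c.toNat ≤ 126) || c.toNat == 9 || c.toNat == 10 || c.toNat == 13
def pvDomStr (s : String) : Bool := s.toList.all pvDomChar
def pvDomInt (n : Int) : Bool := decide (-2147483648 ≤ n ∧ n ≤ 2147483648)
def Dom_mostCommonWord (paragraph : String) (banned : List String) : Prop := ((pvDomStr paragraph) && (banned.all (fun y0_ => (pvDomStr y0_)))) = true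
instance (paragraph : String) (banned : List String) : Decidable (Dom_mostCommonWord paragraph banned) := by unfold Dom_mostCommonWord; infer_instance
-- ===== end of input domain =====

-- B tokenizes by translating the delimiter characters to spaces and splitting on ' ',
-- counts with a Counter and takes a single first-wins max over the non-banned words,
-- instead of A's manual char-accumulate-and-flush loop and hand-rolled dict + arg-max scan.


-- ===== PORT A =====
-- the delimiter string " !?',;." as a char list ('c in " !?',;."' is membership of a single char)
def delimsA : List Char := [' ', '!', '?', '\'', ',', ';', '.']

-- one step of A's char loop: state = (current word as chars, counts); counts[word] += 1 is Dict.modify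
def stepA (st : List Char × PySem.Dict String Int) (c : Char) : List Char × PySem.Dict String Int :=
  if delimsA.contains c then
    if st.1 ≠ [] then ([], st.2.modify (String.ofList st.1) 0 (· + 1)) else st
  else (st.1 ++ [PySem.Chars.lowerChar c], st.2)

def mostCommonWord (paragraph : String) (banned : List String) : String :=
  let counts := ((paragraph.toList ++ [' ']).foldl stepA ([], PySem.Dict.empty)).2
  let bannedS := PySem.Set.ofList banned
  let fin := counts.items.foldl
    (fun (st : String × Int) wc =>
      if PySem.Set.contains bannedS wc.1 = false ∧ wc.2 > st.2 then wc else st) ("", 0)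
  fin.1

-- ===== PORT B =====
-- the translate table "!?',;." → ' '  (str.maketrans + translate is the char-by-char map; exact for ASCII)
def tableB : List Char := ['!', '?', '\'', ',', ';', '.']

def mostCommonWord_alt (paragraph : String) (banned : List String) : String :=
  let translated := (PySem.Str.lower paragraph).toList.map (fun c => if tableB.contains c then ' ' else c)
  let words := ((PySem.Chars.splitOn translated [' ']).map String.ofList).filter (fun w => w ≠ "")
  let counts := PySem.Dict.counter words
  let bannedS := PySem.Set.ofList banned
  PySem.List.maxD (counts.keys.filter (fun w => !(PySem.Set.contains bannedS w)))
    (fun w => counts.getD w 0) ""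

-- ===== PRECONDITION & SPEC =====
def Spec_mostCommonWord (paragraph : String) (banned : List String) (out : String) : Prop := out = mostCommonWord_alt paragraph banned
instance (paragraph : String) (banned : List String) (out : String) : Decidable (Spec_mostCommonWord paragraph banned out) := by unfold Spec_mostCommonWord; infer_instance

-- ===== CLAIM (what is proved, stated in full; the proofs are below) =====
def Claim_equal_mostCommonWord : Prop := ∀ (paragraph : String) (banned : List String), Dom_mostCommonWord paragraph banned → Spec_mostCommonWord paragraph banned (mostCommonWord paragraph banned)

-- ===== LEMMAS AND PROOFS =====

-- the tokenizer A's loop implements: flush the accumulated word at each delimiter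
def tokGo : List Char → List Char → List String
  | [], _ => []
  | c :: rest, w =>
    if delimsA.contains c then
      (if w ≠ [] then String.ofList w :: tokGo rest [] else tokGo rest [])
    else tokGo rest (w ++ [PySem.Chars.lowerChar c])

-- what one translated character is: a delimiter becomes ' ', anything else its lowercase form
def trChar (c : Char) : Char :=
  if delimsA.contains c then ' ' else PySem.Chars.lowerChar c

-- mySplit l cur: what splitOn l [' '] computes, with the (reversed) current piece cur accumulated
def mySplit : List Char → List Char → List (List Char)
  | [], cur => [cur.reverse]
  | c :: rest, cur => if c = ' ' then cur.reverse :: mySplit rest [] else mySplit rest (c :: cur)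

theorem lowerChar_toNat_of_upper (c : Char) (h : PySem.Chars.isupper c = true) :
    97 ≤ (PySem.Chars.lowerChar c).toNat ∧ (PySem.Chars.lowerChar c).toNat ≤ 122 := by
  have hb : 65 ≤ c.toNat ∧ c.toNat ≤ 90 := by
    simp only [PySem.Chars.isupper, Bool.and_eq_true, decide_eq_true_eq] at h
    obtain ⟨h1, h2⟩ := h
    rw [Char.le_def, UInt32.le_iff_toNat_le] at h1 h2
    exact ⟨h1, h2⟩
  have hv : (c.toNat + 32).isValidChar := Or.inl (by omega)
  unfold PySem.Chars.lowerChar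
  rw [if_pos h, Char.toNat_ofNat, if_pos hv]
  omega

theorem lowerChar_not_delim (c : Char) (h : delimsA.contains c = false) :
    tableB.contains (PySem.Chars.lowerChar c) = false ∧ PySem.Chars.lowerChar c ≠ ' ' := by
  by_cases hu : PySem.Chars.isupper c = true
  · have hb := lowerChar_toNat_of_upper c hu
    constructor
    · rw [Bool.eq_false_iff]
      intro hmem
      have hm : PySem.Chars.lowerChar c = '!' ∨ PySem.Chars.lowerChar c = '?' ∨
          PySem.Chars.lowerChar c = '\'' ∨ PySem.Chars.lowerChar c = ',' ∨
          PySem.Chars.lowerChar c = ';' ∨ PySem.Chars.lowerChar c = '.' := by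
        simpa [tableB] using hmem
      rcases hm with h | h | h | h | h | h <;> rw [h] at hb <;> revert hb <;> decide
    · intro he
      rw [he] at hb
      simp at hb
  · have hl : PySem.Chars.lowerChar c = c := by
      unfold PySem.Chars.lowerChar
      rw [if_neg hu]
    have hnm : c ∉ delimsA := by simpa using h
    rw [hl]
    constructor
    · rw [Bool.eq_false_iff]
      intro hmem
      have hm : c ∈ tableB := by simpa using hmem
      apply hnm
      fin_cases hm <;> simp [delimsA]
    · intro he
      exact hnm (he ▸ (by simp [delimsA]))

-- pointwise: translating after lowering is 'delimiter → space, otherwise lower'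
theorem translate_lower (c : Char) :
    (if tableB.contains (PySem.Chars.lowerChar c) then ' ' else PySem.Chars.lowerChar c) = trChar c := by
  by_cases hd : c ∈ delimsA
  · fin_cases hd <;> decide
  · have h := lowerChar_not_delim c (by simpa using hd)
    unfold trChar
    rw [h.1]
    simp [hd]

theorem splitOn_go_space (fuel : Nat) : ∀ (l cur : List Char) (acc : List (List Char)), l.length < fuel →
    PySem.Chars.splitOn.go [' '] fuel l cur acc = acc.reverse ++ mySplit l cur := by
  induction fuel with
  | zero => intro l cur acc h; omega
  | succ fuel ih =>
    intro l cur acc h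
    cases l with
    | nil => simp [PySem.Chars.splitOn.go, mySplit]
    | cons c rest =>
      by_cases hc : c = ' '
      · subst hc
        rw [PySem.Chars.splitOn.go]
        have hpre : [' '].isPrefixOf (' ' :: rest) = true := by simp [List.isPrefixOf]
        rw [if_pos hpre]
        have hdrop : List.drop [' '].length (' ' :: rest) = rest := rfl
        rw [hdrop, ih rest [] (cur.reverse :: acc) (by simp at h; omega)]
        simp [mySplit]
      · rw [PySem.Chars.splitOn.go]
        have hp : [' '].isPrefixOf (c :: rest) = false := by
          simp [List.isPrefixOf]
          exact fun he => hc he.symm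
        rw [if_neg (by simp [hp])]
        rw [ih rest (c :: cur) acc (by simp at h; omega)]
        simp [mySplit, hc]

theorem splitOn_space (l : List Char) : PySem.Chars.splitOn l [' '] = mySplit l [] := by
  rw [PySem.Chars.splitOn, splitOn_go_space (l.length + 1) l [] [] (by omega)]
  rfl

-- A's loop fused with the tokenizer: the dict component is the count fold over the tokens
theorem fuseA : ∀ (cs w : List Char) (d : PySem.Dict String Int),
    (cs.foldl stepA (w, d)).2 = (tokGo cs w).foldl (fun d t => d.modify t 0 (· + 1)) d := by
  intro cs
  induction cs with
  | nil => intro w d; simp [tokGo]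
  | cons c rest ih =>
    intro w d
    simp only [List.foldl_cons, tokGo, stepA]
    by_cases hd : c ∈ delimsA
    · by_cases hw : w = []
      · subst hw
        simp [hd]
        exact ih [] d
      · simp [hd, hw]
        exact ih [] _
    · simp [hd]
      exact ih (w ++ [PySem.Chars.lowerChar c]) d

-- the split-filter tokenization equals A's flush tokenizer (with the trailing flush space)
theorem split_eq_tok : ∀ (cs w : List Char),
    ((mySplit (cs.map trChar) w.reverse).map String.ofList).filter (fun s => s ≠ "")
      = tokGo (cs ++ [' ']) w := by
  intro cs
  induction cs with
  | nil =>
    intro w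
    simp only [List.map_nil, List.nil_append]
    by_cases hw : w = []
    · subst hw; simp [mySplit, tokGo, delimsA]
    · simp [mySplit, tokGo, delimsA, hw, String.ofList_eq_empty_iff]
  | cons c rest ih =>
    intro w
    simp only [List.map_cons, List.cons_append]
    by_cases hd : c ∈ delimsA
    · have htr : trChar c = ' ' := by simp [trChar, hd]
      rw [htr, tokGo]
      simp only [mySplit, List.reverse_reverse, List.map_cons, if_pos]
      by_cases hw : w = []
      · subst hw
        simp [hd]
        simpa using ih []
      · have h1 := ih []
        simp only [List.reverse_nil] at h1
        simp [hd, hw, String.ofList_eq_empty_iff]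
        simpa using h1
    · have htr : trChar c = PySem.Chars.lowerChar c := by simp [trChar, hd]
      have hne : PySem.Chars.lowerChar c ≠ ' ' := (lowerChar_not_delim c (by simpa using hd)).2
      rw [htr, tokGo]
      simp only [mySplit, hne, if_neg, not_false_iff]
      have hrev : PySem.Chars.lowerChar c :: w.reverse = (w ++ [PySem.Chars.lowerChar c]).reverse := by
        simp
      rw [hrev]
      simp [hd]
      simpa using ih (w ++ [PySem.Chars.lowerChar c])

-- the two final scans agree: A's strict-> pair scan is the first-wins max over the non-banned keys
theorem scan_eq_max (g : String → Int) (b : String → Bool)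
    (f : Option String → String → Option String)
    (hf1 : ∀ x, f none x = some x)
    (hf2 : ∀ m x, f (some m) x = if g m < g x then some x else some m) :
    ∀ (K : List String) (st : String × Int) (acc : Option String),
    ((st = ("", 0) ∧ acc = none) ∨ (∃ m, st = (m, g m) ∧ acc = some m)) →
    (∀ k ∈ K, 1 ≤ g k) →
    (K.foldl (fun st k => if b k = false ∧ g k > st.2 then (k, g k) else st) st).1
      = ((K.filter (fun w => !(b w))).foldl f acc).getD "" := by
  intro K
  induction K with
  | nil =>
    intro st acc hinv _
    rcases hinv with ⟨h1, h2⟩ | ⟨m, h1, h2⟩ <;> subst h1 <;> subst h2 <;> rfl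
  | cons k K ih =>
    intro st acc hinv hK
    have htail : ∀ x ∈ K, 1 ≤ g x := fun x hx => hK x (List.mem_cons_of_mem _ hx)
    by_cases hb : b k = true
    · rw [List.foldl_cons, List.filter_cons_of_neg (by simp [hb])]
      refine ih _ _ ?_ htail
      rcases hinv with ⟨h1, h2⟩ | ⟨m, h1, h2⟩ <;> subst h1 <;> subst h2
      · exact Or.inl ⟨by simp [hb], rfl⟩
      · exact Or.inr ⟨m, by simp [hb], rfl⟩
    · have hbf : b k = false := by simpa using hb
      have hk1 : 1 ≤ g k := hK k List.mem_cons_self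
      rw [List.foldl_cons, List.filter_cons_of_pos (by simp [hbf]), List.foldl_cons]
      refine ih _ _ ?_ htail
      rcases hinv with ⟨h1, h2⟩ | ⟨m, h1, h2⟩ <;> subst h1 <;> subst h2
      · exact Or.inr ⟨k, by simp [hbf]; omega, hf1 k⟩
      · by_cases hgt : g m < g k
        · exact Or.inr ⟨k, by simp [hbf, hgt], by rw [hf2]; simp [hgt]⟩
        · exact Or.inr ⟨m, by simp [hbf, hgt, gt_iff_lt], by rw [hf2]; simp [hgt]⟩

-- ===== VERDICT (by name: the statement is the Claim_ definition above) =====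
theorem mostCommonWord_spec : Claim_equal_mostCommonWord := by
  intro p banned _
  unfold Spec_mostCommonWord mostCommonWord mostCommonWord_alt
  simp only [PySem.Str.toList_lower, PySem.Chars.lower, List.map_map]
  have hmap : ((fun c => if tableB.contains c then ' ' else c) ∘ PySem.Chars.lowerChar) = trChar :=
    funext fun c => translate_lower c
  rw [hmap, splitOn_space]
  have hwords := split_eq_tok p.toList []
  simp only [List.reverse_nil] at hwords
  rw [hwords]
  rw [fuseA (p.toList ++ [' ']) [] PySem.Dict.empty, ← PySem.Dict.counter_eq_foldl]
  rw [PySem.Dict.items_counter, PySem.Dict.keys_counter]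
  have hg : (fun w => (PySem.Dict.counter (tokGo (p.toList ++ [' ']) [])).getD w 0)
      = fun w => ((List.count w (tokGo (p.toList ++ [' ']) [])) : Int) :=
    funext (fun w => PySem.Dict.getD_counter _ w)
  rw [hg, List.foldl_map]
  simp only [PySem.List.maxD, PySem.List.max?]
  refine scan_eq_max (fun w => ((List.count w (tokGo (p.toList ++ [' ']) [])) : Int))
    (fun w => (PySem.Set.ofList banned).contains w) _ (fun _ => rfl) (fun _ _ => rfl)
    (PySem.Set.ofList (tokGo (p.toList ++ [' ']) [])) ("", 0) none (Or.inl ⟨rfl, rfl⟩) ?_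
  intro k hk
  have hmem : k ∈ tokGo (p.toList ++ [' ']) [] := (PySem.Set.mem_ofList _ k).mp hk
  have h1 : 0 < List.count k (tokGo (p.toList ++ [' ']) []) := List.count_pos_iff.mpr hmem
  show (1 : Int) ≤ ((List.count k (tokGo (p.toList ++ [' ']) [])) : Int)
  omega
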